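-- pv_equiv track=rewrite | github.com/matthewknight/cosc364trafficplanning | main.py | calc_trans_node_constraints
-- ===== SOURCE A (Python) =====
-- def calc_trans_node_constraints(x, y, z):
--     toReturn = ""
--     for i in range(1, y+1):
--         for j in range(1, x+1):
--             for k in range(1, z+1):
--                 if j == 1 and k == 1:
--                     toReturn += "TransConstraints: x{}{}{}".format(j, i, k)
--                 elif j == x and k == z:
--                     toReturn += " + x{}{}{} - p <= 0\n".format(j, i, k)
--                 else:
--                     toReturn += " + x{}{}{}".format(j, i, k)
--     return toReturn
-- ===== SOURCE B (Python) =====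
-- def calc_trans_node_constraints(x, y, z):
--     lines = []
--     for i in range(1, y + 1):
--         terms = ["x{}{}{}".format(j, i, k)
--                  for j in range(1, x + 1) for k in range(1, z + 1)]
--         if terms:
--             line = "TransConstraints: " + " + ".join(terms)
--             if len(terms) > 1:
--                 line += " - p <= 0\n"
--             lines.append(line)
--     return "".join(lines)
-- ===== Notes on version B (the rewrite author's own statement) =====
-- stated objective: simpler
-- what changed: Replaces A's per-element first/last/middle conditionals inside a triple loop by collecting the term strings for each line and joining them with ' + ', appending the '- p <= 0' suffix only when the line has more than one term.
import Mathlib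
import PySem

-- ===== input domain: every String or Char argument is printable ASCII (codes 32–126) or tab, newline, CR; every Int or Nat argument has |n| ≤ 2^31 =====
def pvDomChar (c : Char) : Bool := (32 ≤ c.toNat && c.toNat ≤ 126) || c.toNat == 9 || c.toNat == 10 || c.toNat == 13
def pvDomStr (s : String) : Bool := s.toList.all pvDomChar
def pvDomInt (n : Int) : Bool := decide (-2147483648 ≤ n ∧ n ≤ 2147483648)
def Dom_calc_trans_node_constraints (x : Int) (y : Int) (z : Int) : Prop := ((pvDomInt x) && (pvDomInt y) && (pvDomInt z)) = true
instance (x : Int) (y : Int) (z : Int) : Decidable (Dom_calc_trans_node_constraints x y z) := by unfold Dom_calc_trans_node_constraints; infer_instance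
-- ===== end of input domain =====

-- B replaces A's per-element first/last/middle conditionals by collecting the term strings per line and
-- joining them with ' + ' (objective: simpler; same asymptotic cost).

-- ===== PORT A =====
-- literal transliteration of A's triple loop with a string accumulator
def calc_trans_node_constraints (x : Int) (y : Int) (z : Int) : String :=
  (PySem.List.pyRange 1 (y+1) 1).foldl (fun acc i =>
    (PySem.List.pyRange 1 (x+1) 1).foldl (fun acc j =>
      (PySem.List.pyRange 1 (z+1) 1).foldl (fun acc k =>
        if j = 1 ∧ k = 1 then
          acc ++ ("TransConstraints: x" ++ PySem.Int.toStr j ++ PySem.Int.toStr i ++ PySem.Int.toStr k)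
        else if j = x ∧ k = z then
          acc ++ (" + x" ++ PySem.Int.toStr j ++ PySem.Int.toStr i ++ PySem.Int.toStr k ++ " - p <= 0\n")
        else
          acc ++ (" + x" ++ PySem.Int.toStr j ++ PySem.Int.toStr i ++ PySem.Int.toStr k)) acc) acc) ""

-- ===== PORT B =====
-- transliteration of Source B: per i collect the term strings, join with ' + ', append the suffix only when
-- there is more than one term, skip the line when there are no terms, and ''.join the lines
def calc_trans_node_constraints_alt (x : Int) (y : Int) (z : Int) : String :=
  PySem.Str.join ""
    ((PySem.List.pyRange 1 (y+1) 1).foldl (fun lines i =>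
      let terms := (PySem.List.pyRange 1 (x+1) 1).flatMap (fun j =>
        (PySem.List.pyRange 1 (z+1) 1).map (fun k =>
          "x" ++ PySem.Int.toStr j ++ PySem.Int.toStr i ++ PySem.Int.toStr k))
      if terms.isEmpty then lines
      else
        let line := "TransConstraints: " ++ PySem.Str.join " + " terms
        lines ++ [if 1 < terms.length then line ++ " - p <= 0\n" else line]) [])

-- ===== PRECONDITION & SPEC =====
def Spec_calc_trans_node_constraints (x : Int) (y : Int) (z : Int) (out : String) : Prop := out = calc_trans_node_constraints_alt x y z
instance (x : Int) (y : Int) (z : Int) (out : String) : Decidable (Spec_calc_trans_node_constraints x y z out) := by unfold Spec_calc_trans_node_constraints; infer_instance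

-- ===== CLAIM (what is proved, stated in full; the proofs are below) =====
def Claim_equal_calc_trans_node_constraints : Prop := ∀ (x : Int) (y : Int) (z : Int), Dom_calc_trans_node_constraints x y z → Spec_calc_trans_node_constraints x y z (calc_trans_node_constraints x y z)

-- ===== LEMMAS AND PROOFS =====

def pvHDR : List Char := "TransConstraints: ".toList
def pvSEP : List Char := " + ".toList
def pvSUF : List Char := " - p <= 0\n".toList
def pvTerm (i j k : Int) : List Char :=
  "x".toList ++ (PySem.Int.toStr j).toList ++ (PySem.Int.toStr i).toList ++ (PySem.Int.toStr k).toList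
def pvBT (x z i j k : Int) : List Char :=
  if j = 1 ∧ k = 1 then pvHDR ++ pvTerm i j k
  else if j = x ∧ k = z then pvSEP ++ pvTerm i j k ++ pvSUF
  else pvSEP ++ pvTerm i j k
def pvPairs (x z : Int) : List (Int × Int) :=
  (PySem.List.pyRange 1 (x+1) 1) ×ˢ (PySem.List.pyRange 1 (z+1) 1)
def pvLine (x z i : Int) : List Char :=
  pvHDR ++ List.intercalate pvSEP ((pvPairs x z).map (fun p => pvTerm i p.1 p.2))
    ++ (if 1 < (pvPairs x z).length then pvSUF else [])

-- generic: toList of a string-append fold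
theorem pvFold {α : Type} (L : List α) (f : String → α → String) (g : α → List Char)
    (h : ∀ a t, (f a t).toList = a.toList ++ g t) :
    ∀ acc : String, (L.foldl f acc).toList = acc.toList ++ L.flatMap g := by
  induction L with
  | nil => intro acc; simp
  | cons t L ih => intro acc; simp [List.foldl_cons, ih, h]

theorem pvProdFlat {α β γ : Type} (l1 : List α) (l2 : List β) (f : α → β → List γ) :
    l1.flatMap (fun a => l2.flatMap (fun b => f a b)) = (l1 ×ˢ l2).flatMap (fun p => f p.1 p.2) := by
  induction l1 with
  | nil => simp
  | cons a t ih => simp [List.flatMap_cons, ih, List.flatMap_append, List.flatMap_map]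

theorem pvProdMap {α β γ : Type} (l1 : List α) (l2 : List β) (f : α → β → γ) :
    l1.flatMap (fun a => l2.map (fun b => f a b)) = (l1 ×ˢ l2).map (fun p => f p.1 p.2) := by
  induction l1 with
  | nil => simp
  | cons a t ih => simp [List.flatMap_cons, ih, List.map_map]

theorem pvIntercalate_cons (sep a : List Char) (l : List (List Char)) :
    List.intercalate sep (a :: l) = a ++ l.flatMap (fun t => sep ++ t) := by
  induction l generalizing a with
  | nil => simp [List.intercalate]
  | cons b t ih =>
      rw [show List.intercalate sep (a::b::t) = a ++ sep ++ List.intercalate sep (b::t) from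
        PySem.Chars.join_cons_cons sep a b t, ih]
      simp

theorem pvIntercalate_nil_flatten (l : List (List Char)) :
    List.intercalate [] l = l.flatten := by
  cases l with
  | nil => simp [List.intercalate]
  | cons a t => rw [pvIntercalate_cons]; simp

-- structure of the pair list when it has more than one element
theorem pvPairs_decomp (x z : Int) (hx : 1 ≤ x) (hz : 1 ≤ z) (hne : ¬(x = 1 ∧ z = 1)) :
    ∃ mid, pvPairs x z = (1, 1) :: mid ++ [(x, z)] ∧ ((1:Int),(1:Int)) ∉ mid ∧ (x, z) ∉ mid := by
  have hxz : ((x : Int), z) ≠ (((1:Int)), (1:Int)) := by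
    intro hcontra
    exact hne ⟨congrArg Prod.fst hcontra, congrArg Prod.snd hcontra⟩
  have hjs1 : PySem.List.pyRange 1 (x+1) 1 = 1 :: PySem.List.pyRange 2 (x+1) 1 :=
    PySem.List.pyRange_one_cons (by omega)
  have hks1 : PySem.List.pyRange 1 (z+1) 1 = 1 :: PySem.List.pyRange 2 (z+1) 1 :=
    PySem.List.pyRange_one_cons (by omega)
  have hjs2 : PySem.List.pyRange 1 (x+1) 1 = PySem.List.pyRange 1 x 1 ++ [x] :=
    PySem.List.pyRange_one_succ_right (by omega)
  have hks2 : PySem.List.pyRange 1 (z+1) 1 = PySem.List.pyRange 1 z 1 ++ [z] :=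
    PySem.List.pyRange_one_succ_right (by omega)
  have hc : pvPairs x z = ((1:Int),(1:Int)) ::
      ((PySem.List.pyRange 2 (z+1) 1).map (Prod.mk (1:Int)) ++
        (PySem.List.pyRange 2 (x+1) 1).flatMap (fun j =>
          (((1:Int) :: PySem.List.pyRange 2 (z+1) 1)).map (Prod.mk j))) := by
    unfold pvPairs
    rw [hjs1, hks1]
    simp [SProd.sprod, List.product, List.flatMap_cons]
  have ha : pvPairs x z =
      ((PySem.List.pyRange 1 x 1).flatMap (fun j =>
          (PySem.List.pyRange 1 z 1 ++ [z]).map (Prod.mk j)) ++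
        (PySem.List.pyRange 1 z 1).map (Prod.mk x)) ++ [(x,z)] := by
    unfold pvPairs
    rw [hjs2, hks2]
    simp [SProd.sprod, List.product, List.flatMap_append, List.flatMap_cons, List.map_append,
      List.append_assoc]
  have hnd : (pvPairs x z).Nodup :=
    List.Nodup.product (PySem.List.nodup_pyRange_one _ _) (PySem.List.nodup_pyRange_one _ _)
  obtain ⟨P, hP⟩ : ∃ P, pvPairs x z = P ++ [(x,z)] := ⟨_, ha⟩
  rw [hc] at hP
  cases P with
  | nil =>
      simp [Prod.ext_iff] at hP
      omega
  | cons p P' =>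
      rw [List.cons_append] at hP
      obtain ⟨hp, hT⟩ := List.cons_eq_cons.mp hP
      have hfull : pvPairs x z = ((1:Int),(1:Int)) :: P' ++ [(x,z)] := by
        rw [hc, hT]; simp
      rw [hfull] at hnd
      have hnc := List.nodup_cons.mp hnd
      have hmem1 : ((1:Int),(1:Int)) ∉ P' := fun hm => hnc.1 (List.mem_append_left _ hm)
      have hdisj := (List.nodup_append.mp hnc.2).2.2
      have hmem2 : ((x:Int),z) ∉ P' := fun hm => hdisj (x, z) hm (x, z) (List.mem_singleton_self _) rfl
      exact ⟨P', hfull, hmem1, hmem2⟩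

theorem pvCore (x z : Int) (hx : 1 ≤ x) (hz : 1 ≤ z) (i : Int) :
    (pvPairs x z).flatMap (fun p => pvBT x z i p.1 p.2) = pvLine x z i := by
  by_cases hone : x = 1 ∧ z = 1
  · obtain ⟨rfl, rfl⟩ := hone
    have h11 : pvPairs 1 1 = [((1:Int), (1:Int))] := by
      unfold pvPairs
      rw [PySem.List.pyRange_one_singleton]
      rfl
    rw [h11]
    unfold pvLine pvBT
    rw [h11]
    simp [List.intercalate]
  · obtain ⟨mid, hdecomp, hm1, hm2⟩ := pvPairs_decomp x z hx hz hone
    have hxz1 : ¬(x = 1 ∧ z = 1) := hone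
    unfold pvLine
    rw [hdecomp]
    have hmid : mid.flatMap (fun p => pvBT x z i p.1 p.2) =
        mid.flatMap (fun p => pvSEP ++ pvTerm i p.1 p.2) := by
      apply List.flatMap_congr
      intro p hp
      unfold pvBT
      rw [if_neg, if_neg]
      · intro hc
        exact hm2 (by rw [show p = (x, z) from Prod.ext hc.1 hc.2] at hp; exact hp)
      · intro hc
        exact hm1 (by rw [show p = ((1:Int), (1:Int)) from Prod.ext hc.1 hc.2] at hp; exact hp)
    have hbt11 : pvBT x z i 1 1 = pvHDR ++ pvTerm i 1 1 := by
      unfold pvBT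
      rw [if_pos ⟨rfl, rfl⟩]
    have hbtxz : pvBT x z i x z = pvSEP ++ pvTerm i x z ++ pvSUF := by
      unfold pvBT
      rw [if_neg hxz1, if_pos ⟨rfl, rfl⟩]
    have hlen : 1 < (((1:Int),(1:Int)) :: mid ++ [(x, z)]).length := by simp
    rw [if_pos hlen]
    simp only [List.flatMap_cons, List.flatMap_append, List.map_cons, List.map_append,
      hmid, hbt11, hbtxz]
    rw [List.cons_append, pvIntercalate_cons]
    simp [List.flatMap_append, List.flatMap_map, List.append_assoc]

theorem pvA_toList (x y z : Int) :
    (calc_trans_node_constraints x y z).toList =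
      (PySem.List.pyRange 1 (y+1) 1).flatMap (fun i =>
        (pvPairs x z).flatMap (fun p => pvBT x z i p.1 p.2)) := by
  unfold calc_trans_node_constraints
  rw [pvFold _ _ (fun i => (PySem.List.pyRange 1 (x+1) 1).flatMap (fun j =>
        (PySem.List.pyRange 1 (z+1) 1).flatMap (fun k => pvBT x z i j k))) ?_ ""]
  · simp only [String.toList_empty, List.nil_append]
    exact List.flatMap_congr (fun i _ => pvProdFlat _ _ _)
  · intro a i
    rw [pvFold _ _ (fun j => (PySem.List.pyRange 1 (z+1) 1).flatMap (fun k => pvBT x z i j k)) ?_ a]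
    intro a j
    rw [pvFold _ _ (fun k => pvBT x z i j k) ?_ a]
    intro a k
    unfold pvBT
    by_cases h1 : j = 1 ∧ k = 1 <;> by_cases h2 : j = x ∧ k = z <;>
      (simp [h1, h2, pvHDR, pvSEP, pvSUF, pvTerm, String.toList_append];
       try (split_ifs <;> simp_all [String.toList_append]))

theorem pvTerms_eq (x z i : Int) :
    (PySem.List.pyRange 1 (x+1) 1).flatMap (fun j =>
        (PySem.List.pyRange 1 (z+1) 1).map (fun k =>
          "x" ++ PySem.Int.toStr j ++ PySem.Int.toStr i ++ PySem.Int.toStr k)) =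
      (pvPairs x z).map (fun p => "x" ++ PySem.Int.toStr p.1 ++ PySem.Int.toStr i ++ PySem.Int.toStr p.2) :=
  pvProdMap _ _ _

theorem pvMem11 (x z : Int) (hx : 1 ≤ x) (hz : 1 ≤ z) : ((1:Int), (1:Int)) ∈ pvPairs x z :=
  List.pair_mem_product.mpr
    ⟨PySem.List.mem_pyRange_one.mpr ⟨le_refl 1, by omega⟩,
     PySem.List.mem_pyRange_one.mpr ⟨le_refl 1, by omega⟩⟩

theorem pvPairs_ne_nil (x z : Int) (hx : 1 ≤ x) (hz : 1 ≤ z) : pvPairs x z ≠ [] :=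
  List.ne_nil_of_mem (pvMem11 x z hx hz)

theorem pvLineStr (x z i : Int) :
    (String.toList ∘ (fun i : Int =>
      if 1 < ((PySem.List.pyRange 1 (x+1) 1).flatMap (fun j =>
          (PySem.List.pyRange 1 (z+1) 1).map (fun k =>
            "x" ++ PySem.Int.toStr j ++ PySem.Int.toStr i ++ PySem.Int.toStr k))).length
      then ("TransConstraints: " ++ PySem.Str.join " + " ((PySem.List.pyRange 1 (x+1) 1).flatMap (fun j =>
          (PySem.List.pyRange 1 (z+1) 1).map (fun k =>
            "x" ++ PySem.Int.toStr j ++ PySem.Int.toStr i ++ PySem.Int.toStr k)))) ++ " - p <= 0\n"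
      else ("TransConstraints: " ++ PySem.Str.join " + " ((PySem.List.pyRange 1 (x+1) 1).flatMap (fun j =>
          (PySem.List.pyRange 1 (z+1) 1).map (fun k =>
            "x" ++ PySem.Int.toStr j ++ PySem.Int.toStr i ++ PySem.Int.toStr k)))))) i
      = pvLine x z i := by
  simp only [Function.comp_apply, pvTerms_eq, List.length_map]
  unfold pvLine
  by_cases hc : 1 < (pvPairs x z).length <;>
    simp [hc, String.toList_append, PySem.Str.toList_join, pvHDR, pvSEP, pvSUF, pvTerm,
      PySem.Chars.join, List.map_map, Function.comp_def]

theorem pvB_toList_pos (x y z : Int) (hx : 1 ≤ x) (hz : 1 ≤ z) :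
    (calc_trans_node_constraints_alt x y z).toList =
      (PySem.List.pyRange 1 (y+1) 1).flatMap (fun i => pvLine x z i) := by
  unfold calc_trans_node_constraints_alt
  have hne : ∀ i : Int, ((PySem.List.pyRange 1 (x+1) 1).flatMap (fun j =>
      (PySem.List.pyRange 1 (z+1) 1).map (fun k =>
        "x" ++ PySem.Int.toStr j ++ PySem.Int.toStr i ++ PySem.Int.toStr k))).isEmpty = false := by
    intro i
    rw [pvTerms_eq, List.isEmpty_eq_false_iff, ne_eq, List.map_eq_nil_iff]
    exact pvPairs_ne_nil x z hx hz
  simp only [hne, Bool.false_eq_true, if_false]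
  rw [PySem.List.foldl_append_singleton_eq_map
    (fun i => if 1 < ((PySem.List.pyRange 1 (x+1) 1).flatMap (fun j =>
        (PySem.List.pyRange 1 (z+1) 1).map (fun k =>
          "x" ++ PySem.Int.toStr j ++ PySem.Int.toStr i ++ PySem.Int.toStr k))).length
      then ("TransConstraints: " ++ PySem.Str.join " + " ((PySem.List.pyRange 1 (x+1) 1).flatMap (fun j =>
        (PySem.List.pyRange 1 (z+1) 1).map (fun k =>
          "x" ++ PySem.Int.toStr j ++ PySem.Int.toStr i ++ PySem.Int.toStr k)))) ++ " - p <= 0\n"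
      else ("TransConstraints: " ++ PySem.Str.join " + " ((PySem.List.pyRange 1 (x+1) 1).flatMap (fun j =>
        (PySem.List.pyRange 1 (z+1) 1).map (fun k =>
          "x" ++ PySem.Int.toStr j ++ PySem.Int.toStr i ++ PySem.Int.toStr k)))))]
  rw [PySem.Str.toList_join]
  simp only [List.nil_append, List.map_map, show ("" : String).toList = [] from rfl,
    show PySem.Chars.join ([] : List Char) = List.intercalate [] from rfl]
  rw [pvIntercalate_nil_flatten, List.flatMap_def]
  exact List.flatMap_congr (fun i _ => pvLineStr x z i)

theorem pvB_toList_neg (x y z : Int) (h : ¬(1 ≤ x ∧ 1 ≤ z)) :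
    (calc_trans_node_constraints_alt x y z).toList = [] := by
  unfold calc_trans_node_constraints_alt
  have hnil : (PySem.List.pyRange 1 (y+1) 1).foldl (fun (lines : List String) i =>
      let terms := (PySem.List.pyRange 1 (x+1) 1).flatMap (fun j =>
        (PySem.List.pyRange 1 (z+1) 1).map (fun k =>
          "x" ++ PySem.Int.toStr j ++ PySem.Int.toStr i ++ PySem.Int.toStr k))
      if terms.isEmpty then lines
      else
        let line := "TransConstraints: " ++ PySem.Str.join " + " terms
        lines ++ [if 1 < terms.length then line ++ " - p <= 0\n" else line]) [] = [] := by
    have hstep : ∀ i : Int, ((PySem.List.pyRange 1 (x+1) 1).flatMap (fun j =>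
        (PySem.List.pyRange 1 (z+1) 1).map (fun k =>
          "x" ++ PySem.Int.toStr j ++ PySem.Int.toStr i ++ PySem.Int.toStr k))).isEmpty = true := by
      intro i
      rcases not_and_or.mp h with h1 | h1
      · rw [PySem.List.pyRange_one_eq_nil (show x + 1 ≤ 1 by omega)]; simp
      · rw [PySem.List.pyRange_one_eq_nil (show z + 1 ≤ 1 by omega)]; simp
    simp only [hstep, if_pos]
    simp
  rw [hnil]
  simp [PySem.Str.toList_join, PySem.Chars.join, List.intercalate]

theorem pvEmptyRow (x z i : Int) (h : ¬(1 ≤ x ∧ 1 ≤ z)) :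
    (pvPairs x z).flatMap (fun p => pvBT x z i p.1 p.2) = [] := by
  unfold pvPairs
  rcases not_and_or.mp h with h1 | h1
  · rw [PySem.List.pyRange_one_eq_nil (show x + 1 ≤ 1 by omega)]; simp
  · rw [PySem.List.pyRange_one_eq_nil (show z + 1 ≤ 1 by omega)]; simp

-- ===== VERDICT (by name: the statement is the Claim_ definition above) =====
theorem calc_trans_node_constraints_spec : Claim_equal_calc_trans_node_constraints := by
  intro x y z _
  unfold Spec_calc_trans_node_constraints
  apply String.toList_inj.mp
  rw [pvA_toList]
  by_cases h : 1 ≤ x ∧ 1 ≤ z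
  · rw [pvB_toList_pos x y z h.1 h.2]
    exact List.flatMap_congr (fun i _ => pvCore x z h.1 h.2 i)
  · rw [pvB_toList_neg x y z h]
    simp [pvEmptyRow _ _ _ h]
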